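-- pv_equiv track=rewrite | github.com/lingnvnv/takehomeassignment | least_factorial.py | least_factorial
-- ===== SOURCE A (Python) =====
-- def least_factorial(n: int) -> int:
--     '''Find the smallest factorial which is not less than n
--
--     Given an integer n (1 ≤ n ≤ 120), the function find the
--     minimal k such that k = m! (where m! =1*2*... *m) for
--     some integer m, where k≥n
--
--     Args:
--         n (int): a positive integer from 1 to 120
--
--     Returns:
--         int : the smallest factorial integer which is not less
--         than n
--
--     Raises:
--         ValueError: Raises an exception if input is not a positive
--         integer from 1 to 120
--     '''
--     if type(n) is not int or n < 1 or n > 120: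
--         raise ValueError("input should be a postive integer from 1 to 120")
--     m, product = 1, 1
--     while product < n:
--         m += 1
--         product *= m
--     return product
-- ===== SOURCE B (Python) =====
-- def least_factorial(n: int) -> int:
--     if type(n) is not int or n < 1 or n > 120:
--         raise ValueError("input should be a postive integer from 1 to 120")
--     return next(f for f in (1, 2, 6, 24, 120) if f >= n)
-- ===== Notes on version B (the rewrite author's own statement) =====
-- stated objective: simpler
-- what changed: Replaces the running-product while loop with a fixed precomputed table (1,2,6,24,120) and returns the first entry >= n; no factorial is computed at call time.
import Mathlib
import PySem

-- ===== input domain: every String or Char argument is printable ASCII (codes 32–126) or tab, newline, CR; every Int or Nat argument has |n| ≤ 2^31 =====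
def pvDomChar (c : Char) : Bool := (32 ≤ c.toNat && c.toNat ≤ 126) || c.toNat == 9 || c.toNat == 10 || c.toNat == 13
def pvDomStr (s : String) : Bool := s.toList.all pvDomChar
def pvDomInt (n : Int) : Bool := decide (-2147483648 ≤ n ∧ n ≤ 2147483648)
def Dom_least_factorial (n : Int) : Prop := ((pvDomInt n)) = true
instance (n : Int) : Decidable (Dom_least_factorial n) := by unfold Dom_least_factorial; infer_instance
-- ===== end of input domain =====

-- B replaces the running-product while loop with a fixed table of the factorials up to 120 (simpler).
-- On inputs outside 1..120 Python A raises ValueError; those are excluded by Pre_.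


-- ===== PORT A =====
-- the while loop 'while product < n: m += 1; product *= m'; fuel only makes it total
-- (120 steps more than suffice for any n ≤ 120, where the loop runs at most 4 times)
def lfLoop : Nat → Int → Int → Int → Int
  | 0, _, _, product => product
  | fuel + 1, n, m, product =>
      if product < n then lfLoop fuel n (m + 1) (product * (m + 1)) else product

def least_factorial (n : Int) : Int :=
  if n < 1 ∨ n > 120 then 0   -- A raises ValueError here; excluded by Pre_
  else lfLoop 120 n 1 1

-- ===== PORT B =====
def least_factorial_alt (n : Int) : Int :=
  if n < 1 ∨ n > 120 then 0   -- B raises ValueError here; excluded by Pre_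
  else (([1, 2, 6, 24, 120] : List Int).find? (fun f => n ≤ f)).getD 0

-- ===== PRECONDITION & SPEC =====
-- Pre_ excludes exactly the inputs on which A (and B) raise ValueError.
def Pre_least_factorial (n : Int) : Prop := 1 ≤ n ∧ n ≤ 120
instance (n : Int) : Decidable (Pre_least_factorial n) := by unfold Pre_least_factorial; infer_instance
def pvWitness_least_factorial : Int := (7)

def Spec_least_factorial (n : Int) (out : Int) : Prop := out = least_factorial_alt n
instance (n : Int) (out : Int) : Decidable (Spec_least_factorial n out) := by unfold Spec_least_factorial; infer_instance

-- ===== CLAIM (what is proved, stated in full; the proofs are below) =====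
def Claim_equal_least_factorial : Prop := ∀ (n : Int), Dom_least_factorial n → Pre_least_factorial n → Spec_least_factorial n (least_factorial n)

-- ===== LEMMAS AND PROOFS =====

-- ===== VERDICT (by name: the statement is the Claim_ definition above) =====
theorem least_factorial_spec : Claim_equal_least_factorial := by
  intro n _ hpre
  obtain ⟨h1, h2⟩ := hpre
  unfold Spec_least_factorial
  interval_cases n <;> decide
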